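-- pv_equiv track=rewrite | github.com/WojciechAdamiec/UWR | 2019-2020/AI/P3/Z1/main.py | intersect_domain
-- ===== SOURCE A (Python) =====
-- def intersect_domain(dom, pixel=1):
--     # Function deduces which pixels has to be on or off
--     value = 1 if pixel else 0
--     anti_value = 0 if value else 1
--
--     dom = list(dom)  # It is a set, so we need conversion
--     size = len(dom[0])
--
--     intersect = [anti_value] * size
--     for pos in range(size):
--         flag = True
--         for each in dom:
--             if each[pos] != value:
--                 flag = False
--                 break
--         if flag:
--             intersect[pos] = value
--     return intersect
-- ===== SOURCE B (Python) =====
-- def intersect_domain(dom, pixel=1):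
--     # Maintain an evolving set of candidate positions, intersecting per row.
--     value = 1 if pixel else 0
--     anti_value = 0 if value else 1
--
--     dom = list(dom)  # It is a set, so we need conversion
--     size = len(dom[0])
--
--     common = set(range(size))
--     for each in dom:
--         common &= {pos for pos in range(len(each)) if each[pos] == value}
--     return [value if pos in common else anti_value for pos in range(size)]
-- ===== Notes on version B (the rewrite author's own statement) =====
-- stated objective: alternative
-- what changed: Replaces A's per-position inner scan over all rows (with early break) by a single fold that intersects an evolving candidate-position set with each row's matching-position set, then renders the result from that set.
import Mathlib
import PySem

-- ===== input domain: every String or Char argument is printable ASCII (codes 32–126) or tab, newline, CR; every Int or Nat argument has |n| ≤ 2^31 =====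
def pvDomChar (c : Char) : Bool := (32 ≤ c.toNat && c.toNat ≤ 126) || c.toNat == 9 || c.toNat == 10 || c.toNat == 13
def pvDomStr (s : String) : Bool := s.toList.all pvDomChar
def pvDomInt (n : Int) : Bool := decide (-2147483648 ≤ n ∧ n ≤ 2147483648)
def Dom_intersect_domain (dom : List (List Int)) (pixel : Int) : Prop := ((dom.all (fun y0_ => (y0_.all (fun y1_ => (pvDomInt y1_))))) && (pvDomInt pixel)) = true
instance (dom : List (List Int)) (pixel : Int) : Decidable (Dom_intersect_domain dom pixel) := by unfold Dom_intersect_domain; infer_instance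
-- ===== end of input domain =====

-- B replaces A's per-position inner scan (with early break) by a fold that intersects an
-- evolving candidate-position set with each row's matching-position set: an alternative
-- decomposition of the same cost.


-- ===== PORT A =====
-- inner 'for each in dom: if each[pos] != value: flag = False; break' loop;
-- PySem.List.pyGet? = Python indexing; the .getD default (value+1) is only reached
-- outside Pre_ (where Python raises IndexError), it makes the comparison fail.
def pvAInner (dom : List (List Int)) (value : Int) (pos : Nat) : Bool :=
  match dom with
  | [] => true
  | each :: rest =>
      if (PySem.List.pyGet? each (pos : Int)).getD (value + 1) ≠ value then false
      else pvAInner rest value pos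

def intersect_domain (dom : List (List Int)) (pixel : Int) : List Int :=
  let value : Int := if pixel ≠ 0 then 1 else 0
  let anti_value : Int := if value ≠ 0 then 0 else 1
  let size := (dom.headD []).length   -- len(dom[0]); dom = [] is outside Pre_ (IndexError)
  (List.range size).map (fun pos => if pvAInner dom value pos then value else anti_value)

-- ===== PORT B =====
-- {pos for pos in range(len(each)) if each[pos] == value}; the index is always in range
def pvBRow (each : List Int) (value : Int) : List Nat :=
  (List.range each.length).filter (fun pos => each.getD pos 0 == value)

def intersect_domain_alt (dom : List (List Int)) (pixel : Int) : List Int :=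
  let value : Int := if pixel ≠ 0 then 1 else 0
  let anti_value : Int := if value ≠ 0 then 0 else 1
  let size := (dom.headD []).length
  let common := dom.foldl (fun c each => c.filter (fun pos => (pvBRow each value).contains pos)) (List.range size)
  (List.range size).map (fun pos => if common.contains pos then value else anti_value)

-- ===== PRECONDITION & SPEC =====
-- Pre_ is exactly the inputs on which A returns (no IndexError): dom is nonempty and every
-- out-of-range access A's inner loop could reach is shadowed by an earlier mismatching row.
def Pre_intersect_domain (dom : List (List Int)) (pixel : Int) : Prop :=
  dom ≠ [] ∧
  ∀ pos < (dom.headD []).length, ∀ k < dom.length,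
    (dom.getD k []).length ≤ pos →
      ∃ j < k, pos < (dom.getD j []).length ∧
        (dom.getD j []).getD pos 0 ≠ (if pixel ≠ 0 then (1 : Int) else 0)
instance (dom : List (List Int)) (pixel : Int) : Decidable (Pre_intersect_domain dom pixel) := by unfold Pre_intersect_domain; infer_instance
def pvWitness_intersect_domain : List (List Int) × Int := ([[1, 0, 1], [1, 1, 1]], 1)

def Spec_intersect_domain (dom : List (List Int)) (pixel : Int) (out : List Int) : Prop := out = intersect_domain_alt dom pixel
instance (dom : List (List Int)) (pixel : Int) (out : List Int) : Decidable (Spec_intersect_domain dom pixel out) := by unfold Spec_intersect_domain; infer_instance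

-- ===== CLAIM (what is proved, stated in full; the proofs are below) =====
def Claim_equal_intersect_domain : Prop := ∀ (dom : List (List Int)) (pixel : Int), Dom_intersect_domain dom pixel → Pre_intersect_domain dom pixel → Spec_intersect_domain dom pixel (intersect_domain dom pixel)

-- ===== LEMMAS AND PROOFS =====
theorem pvAInner_iff (dom : List (List Int)) (value : Int) (pos : Nat) :
    pvAInner dom value pos = true ↔
      ∀ each ∈ dom, (PySem.List.pyGet? each (pos : Int)).getD (value + 1) = value := by
  induction dom with
  | nil => simp [pvAInner]
  | cons each rest ih =>
      simp only [pvAInner, List.mem_cons]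
      split
      · simp_all
      · simp_all

theorem pvMem_pvBRow (each : List Int) (value : Int) (pos : Nat) :
    pos ∈ pvBRow each value ↔
      (PySem.List.pyGet? each (pos : Int)).getD (value + 1) = value := by
  simp only [pvBRow, List.mem_filter, List.mem_range, PySem.List.pyGet?_natCast, beq_iff_eq]
  by_cases h : pos < each.length
  · simp [h, List.getD_eq_getElem?_getD]
  · simp only [h, false_and]
    rw [List.getElem?_eq_none (by omega)]
    simp only [Option.getD_none, false_iff]
    omega

theorem pvMem_common (dom : List (List Int)) (value : Int)
    (init : List Nat) (pos : Nat) :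
    (pos ∈ dom.foldl (fun c each => c.filter (fun p => (pvBRow each value).contains p)) init) ↔
      (pos ∈ init ∧ ∀ each ∈ dom, pos ∈ pvBRow each value) := by
  induction dom generalizing init with
  | nil => simp
  | cons each rest ih =>
      simp only [List.foldl_cons, ih, List.mem_filter, List.contains_iff_mem, List.mem_cons]
      constructor
      · rintro ⟨⟨h1, h2⟩, h3⟩
        exact ⟨h1, fun e he => he.elim (fun h => h ▸ h2) (h3 e)⟩
      · rintro ⟨h1, h2⟩
        exact ⟨⟨h1, h2 each (Or.inl rfl)⟩, fun e he => h2 e (Or.inr he)⟩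

-- ===== VERDICT (by name: the statement is the Claim_ definition above) =====
theorem intersect_domain_spec : Claim_equal_intersect_domain := by
  intro dom pixel _ _
  unfold Spec_intersect_domain intersect_domain intersect_domain_alt
  apply List.map_congr_left
  intro pos hpos
  rw [List.mem_range] at hpos
  have h : pvAInner dom (if pixel ≠ 0 then 1 else 0) pos =
      ((dom.foldl (fun c each => c.filter (fun p =>
          (pvBRow each (if pixel ≠ 0 then 1 else 0)).contains p))
        (List.range (dom.headD []).length)).contains pos) := by
    rw [Bool.eq_iff_iff, pvAInner_iff, List.contains_iff_mem, pvMem_common]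
    simp only [pvMem_pvBRow, List.mem_range]
    exact ⟨fun hall => ⟨hpos, hall⟩, fun h => h.2⟩
  rw [h]
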